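-- pv_equiv track=rewrite | github.com/jjyjoy1/OligoProbe_Pipeline | vcf_to_fasta.py | normalize_chromosome_name
-- ===== SOURCE A (Python) =====
-- def normalize_chromosome_name(chrom, reference_chroms):
--     """
--     Normalize chromosome names to match reference genome
--     Handles chr1 vs 1, chrM vs chrMT, etc.
--     """
--     # Try exact match first
--     if chrom in reference_chroms:
--         return chrom
--
--     # Try adding 'chr' prefix
--     if f"chr{chrom}" in reference_chroms:
--         return f"chr{chrom}"
--
--     # Try removing 'chr' prefix
--     if chrom.startswith('chr') and chrom[3:] in reference_chroms:
--         return chrom[3:]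
--
--     # Handle mitochondrial chromosome variations
--     mt_variants = {
--         'M': ['chrM', 'chrMT', 'MT'],
--         'chrM': ['M', 'chrMT', 'MT'],
--         'chrMT': ['M', 'chrM', 'MT'],
--         'MT': ['M', 'chrM', 'chrMT']
--     }
--
--     if chrom in mt_variants:
--         for variant in mt_variants[chrom]:
--             if variant in reference_chroms:
--                 return variant
--
--     return None
-- ===== SOURCE B (Python) =====
-- MT_VARIANTS = {
--     'M': ['chrM', 'chrMT', 'MT'],
--     'chrM': ['M', 'chrMT', 'MT'],
--     'chrMT': ['M', 'chrM', 'MT'],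
--     'MT': ['M', 'chrM', 'chrMT'],
-- }
--
-- def _rank(name, chrom, prefixed, stripped, variants):
--     """Priority of reference name `name` as a rendering of `chrom` (lower = better), or None."""
--     if name == chrom:
--         return 0
--     if name == prefixed:
--         return 1
--     if stripped is not None and name == stripped:
--         return 2
--     if variants is not None and name in variants:
--         return 3 + variants.index(name)
--     return None
--
-- def normalize_chromosome_name(chrom, reference_chroms):
--     prefixed = "chr" + chrom
--     stripped = chrom[3:] if chrom.startswith("chr") else None
--     variants = MT_VARIANTS.get(chrom)
--     best = None
--     for name in reference_chroms:
--         r = _rank(name, chrom, prefixed, stripped, variants)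
--         if r is not None and (best is None or r < best[0]):
--             best = (r, name)
--     return best[1] if best is not None else None
-- ===== Notes on version B (the rewrite author's own statement) =====
-- stated objective: alternative
-- what changed: B inverts the loops: instead of generating candidate names and testing each against the reference collection, it makes one pass over reference_chroms, scores every reference name with a priority function (_rank: exact=0, chr-prefixed=1, de-prefixed=2, mt-variant=3+i), and returns the minimum-priority (argmin) match.
import Mathlib
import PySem

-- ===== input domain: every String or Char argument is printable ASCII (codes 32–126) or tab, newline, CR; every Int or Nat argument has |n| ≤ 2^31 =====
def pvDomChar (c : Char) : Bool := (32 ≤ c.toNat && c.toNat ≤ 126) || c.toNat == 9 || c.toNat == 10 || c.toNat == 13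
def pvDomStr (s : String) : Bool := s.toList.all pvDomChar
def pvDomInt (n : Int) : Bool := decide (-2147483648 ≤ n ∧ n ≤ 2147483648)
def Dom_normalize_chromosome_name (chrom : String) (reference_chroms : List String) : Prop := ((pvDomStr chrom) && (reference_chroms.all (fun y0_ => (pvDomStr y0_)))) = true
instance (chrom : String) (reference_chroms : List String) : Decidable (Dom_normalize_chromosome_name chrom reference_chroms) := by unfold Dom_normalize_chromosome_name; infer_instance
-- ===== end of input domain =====

-- B inverts the loops: instead of generating candidate names and testing each for membership,
-- it makes one pass over reference_chroms, scores every reference name with a priority function,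
-- and returns the minimum-priority (argmin) match; same return value.

-- ===== PORT A =====
-- the mt_variants literal dict of A
def pvMtVariants : PySem.Dict String (List String) :=
  PySem.Dict.ofList [("M", ["chrM", "chrMT", "MT"]),
                     ("chrM", ["M", "chrMT", "MT"]),
                     ("chrMT", ["M", "chrM", "MT"]),
                     ("MT", ["M", "chrM", "chrMT"])]

-- A's inner 'for variant in mt_variants[chrom]: if variant in reference_chroms: return variant'
def pvAForLoop (variants : List String) (reference_chroms : List String) : Option String :=
  match variants with
  | [] => none
  | v :: rest => if reference_chroms.contains v then some v else pvAForLoop rest reference_chroms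

def normalize_chromosome_name (chrom : String) (reference_chroms : List String) : Option String :=
  if reference_chroms.contains chrom then some chrom
  else if reference_chroms.contains (String.ofList ("chr".toList ++ chrom.toList)) then
    some (String.ofList ("chr".toList ++ chrom.toList))
  else if PySem.Str.startswith chrom "chr"
          && reference_chroms.contains (PySem.Str.slice chrom (some 3) none) then
    some (PySem.Str.slice chrom (some 3) none)
  else
    match PySem.Dict.get? pvMtVariants chrom with
    | some variants => pvAForLoop variants reference_chroms
    | none => none

-- ===== PORT B =====
-- B's MT_VARIANTS constant (same table)
def pvMtVariantsB : PySem.Dict String (List String) :=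
  PySem.Dict.ofList [("M", ["chrM", "chrMT", "MT"]),
                     ("chrM", ["M", "chrMT", "MT"]),
                     ("chrMT", ["M", "chrM", "MT"]),
                     ("MT", ["M", "chrM", "chrMT"])]

-- B's helper _rank(name, chrom, prefixed, stripped, variants)
def pvRankB (name chrom prefixed : String) (stripped : Option String)
    (variants : Option (List String)) : Option Int :=
  if name == chrom then some 0
  else if name == prefixed then some 1
  else if (match stripped with | some s => name == s | none => false) then some 2
  else
    match variants with
    | some vs =>
        if vs.contains name then
          match PySem.List.index? vs name with
          | some i => some (3 + (i : Int))
          | none => none   -- unreachable: guarded by the contains check, kept for totality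
        else none
    | none => none

-- B's 'for name in reference_chroms: …' accumulating the best (rank, name)
def pvLoopB (chrom prefixed : String) (stripped : Option String)
    (variants : Option (List String)) : List String → Option (Int × String) → Option (Int × String)
  | [], best => best
  | name :: rest, best =>
      match pvRankB name chrom prefixed stripped variants with
      | none => pvLoopB chrom prefixed stripped variants rest best
      | some r =>
        match best with
        | none => pvLoopB chrom prefixed stripped variants rest (some (r, name))
        | some (rb, vb) =>
            if r < rb then pvLoopB chrom prefixed stripped variants rest (some (r, name))
            else pvLoopB chrom prefixed stripped variants rest (some (rb, vb))

def normalize_chromosome_name_alt (chrom : String) (reference_chroms : List String) : Option String :=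
  let prefixed := String.ofList ("chr".toList ++ chrom.toList)
  let stripped := if PySem.Str.startswith chrom "chr"
                  then some (PySem.Str.slice chrom (some 3) none) else none
  let variants := PySem.Dict.get? pvMtVariantsB chrom
  match pvLoopB chrom prefixed stripped variants reference_chroms none with
  | some (_, v) => some v
  | none => none

-- ===== PRECONDITION & SPEC =====
def Spec_normalize_chromosome_name (chrom : String) (reference_chroms : List String) (out : Option String) : Prop := out = normalize_chromosome_name_alt chrom reference_chroms
instance (chrom : String) (reference_chroms : List String) (out : Option String) : Decidable (Spec_normalize_chromosome_name chrom reference_chroms out) := by unfold Spec_normalize_chromosome_name; infer_instance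

-- ===== CLAIM (what is proved, stated in full; the proofs are below) =====
def Claim_equal_normalize_chromosome_name : Prop := ∀ (chrom : String) (reference_chroms : List String), Dom_normalize_chromosome_name chrom reference_chroms → Spec_normalize_chromosome_name chrom reference_chroms (normalize_chromosome_name chrom reference_chroms)

-- ===== LEMMAS AND PROOFS =====

-- proof-side helpers ------------------------------------------------------

-- 'first candidate present in refs' (characterises A)
def pvFirstIn (candidates : List String) (refs : List String) : Option String :=
  match candidates with
  | [] => none
  | c :: rest => if refs.contains c then some c else pvFirstIn rest refs

-- B's loop, generic in the rank function
def pvGLoop (f : String → Option Int) : List String → Option (Int × String) → Option (Int × String)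
  | [], best => best
  | name :: rest, best =>
      match f name with
      | none => pvGLoop f rest best
      | some r =>
        match best with
        | none => pvGLoop f rest (some (r, name))
        | some (rb, vb) =>
            if r < rb then pvGLoop f rest (some (r, name))
            else pvGLoop f rest (some (rb, vb))

-- rank function induced by a priority list (first match wins)
def pvRankP (P : List (Int × String)) (name : String) : Option Int :=
  (P.find? (fun p => p.2 == name)).map Prod.fst

-- the candidates in priority order, paired with B's rank values
def pvEnumFrom (k : Int) : List String → List (Int × String)
  | [] => []
  | v :: vs => (k, v) :: pvEnumFrom (k + 1) vs

def pvPof (chrom : String) : List (Int × String) :=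
  (0, chrom) :: (1, String.ofList ("chr".toList ++ chrom.toList)) ::
    ((if PySem.Str.startswith chrom "chr" then [(2, PySem.Str.slice chrom (some 3) none)] else [])
      ++ pvEnumFrom 3 (PySem.Dict.getD pvMtVariantsB chrom []))

-- basic bridges -----------------------------------------------------------

theorem pvLoopB_eq_gLoop (chrom prefixed : String) (stripped : Option String)
    (variants : Option (List String)) (refs : List String) (best : Option (Int × String)) :
    pvLoopB chrom prefixed stripped variants refs best
      = pvGLoop (fun n => pvRankB n chrom prefixed stripped variants) refs best := by
  induction refs generalizing best with
  | nil => rfl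
  | cons name rest ih =>
    simp only [pvLoopB, pvGLoop]
    cases pvRankB name chrom prefixed stripped variants with
    | none => exact ih best
    | some r =>
      cases best with
      | none => exact ih _
      | some p => cases p with | mk rb vb => by_cases h : r < rb <;> simp [h, ih]

theorem pvFirstIn_eq_pvAForLoop (vs rcs : List String) : pvFirstIn vs rcs = pvAForLoop vs rcs := by
  induction vs with
  | nil => rfl
  | cons v rest ih => simp [pvFirstIn, pvAForLoop, ih]

-- gLoop lemmas ------------------------------------------------------------

theorem pvGLoop_congr (f g : String → Option Int) (refs : List String)
    (best : Option (Int × String)) (h : ∀ n ∈ refs, f n = g n) :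
    pvGLoop f refs best = pvGLoop g refs best := by
  induction refs generalizing best with
  | nil => rfl
  | cons name rest ih =>
    have hn := h name (List.mem_cons_self ..)
    have hr : ∀ n ∈ rest, f n = g n := fun n hmem => h n (List.mem_cons_of_mem _ hmem)
    simp only [pvGLoop, hn]
    cases g name with
    | none => exact ih _ hr
    | some r =>
      cases best with
      | none => exact ih _ hr
      | some p => cases p with | mk rb vb => by_cases hlt : r < rb <;> simp [hlt, ih _ hr]

theorem pvGLoop_none (f : String → Option Int) (refs : List String)
    (best : Option (Int × String)) (h : ∀ n ∈ refs, f n = none) :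
    pvGLoop f refs best = best := by
  induction refs with
  | nil => rfl
  | cons name rest ih =>
    have hn := h name (List.mem_cons_self ..)
    simp only [pvGLoop, hn]
    exact ih fun n hmem => h n (List.mem_cons_of_mem _ hmem)

theorem pvGLoop_stay (f : String → Option Int) (refs : List String) (r0 : Int) (c0 : String)
    (hmin : ∀ n r, f n = some r → r0 ≤ r) :
    pvGLoop f refs (some (r0, c0)) = some (r0, c0) := by
  induction refs with
  | nil => rfl
  | cons name rest ih =>
    simp only [pvGLoop]
    cases hf : f name with
    | none => exact ih
    | some r =>
      have : ¬ r < r0 := not_lt.mpr (hmin name r hf)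
      simp [this, ih]

theorem pvGLoop_hit (f : String → Option Int) (r0 : Int) (c0 : String)
    (hc : f c0 = some r0)
    (hmin : ∀ n r, f n = some r → r0 ≤ r)
    (huniq : ∀ n, f n = some r0 → n = c0) :
    ∀ (refs : List String) (best : Option (Int × String)),
      c0 ∈ refs →
      (∀ r v, best = some (r, v) → r0 ≤ r ∧ (r = r0 → v = c0)) →
      pvGLoop f refs best = some (r0, c0) := by
  intro refs
  induction refs with
  | nil => intro best hmem _; exact absurd hmem (List.not_mem_nil)
  | cons name rest ih =>
    intro best hmem hbest
    simp only [pvGLoop]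
    by_cases hrest : c0 ∈ rest
    · -- the invariant is preserved through this step; recurse
      cases hf : f name with
      | none => exact ih best hrest hbest
      | some r =>
        have hle : r0 ≤ r := hmin name r hf
        have heqc : r = r0 → name = c0 := fun h => huniq name (h ▸ hf)
        cases best with
        | none =>
          exact ih _ hrest (by intro r' v' h'; cases h'; exact ⟨hle, heqc⟩)
        | some p =>
          cases p with
          | mk rb vb =>
            have hb := hbest rb vb rfl
            by_cases hlt : r < rb
            · simp only [hlt, if_true]
              exact ih _ hrest (by intro r' v' h'; cases h'; exact ⟨hle, heqc⟩)
            · simp only [hlt, if_false]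
              exact ih _ hrest (by intro r' v' h'; cases h'; exact hb)
    · -- then name = c0, and after this step the best is exactly (r0, c0)
      have hname : name = c0 := by
        rcases List.mem_cons.mp hmem with h | h
        · exact h.symm
        · exact absurd h hrest
      subst hname
      rw [hc]
      cases best with
      | none => exact pvGLoop_stay f rest r0 name hmin
      | some p =>
        cases p with
        | mk rb vb =>
          have hb := hbest rb vb rfl
          show (if r0 < rb then pvGLoop f rest (some (r0, name))
                else pvGLoop f rest (some (rb, vb))) = some (r0, name)
          by_cases hlt : r0 < rb
          · rw [if_pos hlt]
            exact pvGLoop_stay f rest r0 name hmin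
          · have hrb : rb = r0 := le_antisymm (not_lt.mp hlt) hb.1
            have hvb : vb = name := hb.2 hrb
            rw [if_neg hlt, hrb, hvb]
            exact pvGLoop_stay f rest r0 name hmin

-- rankP lemmas ------------------------------------------------------------

theorem pvRankP_nil (name : String) : pvRankP [] name = none := rfl

theorem pvRankP_cons (r0 : Int) (c0 : String) (P : List (Int × String)) (name : String) :
    pvRankP ((r0, c0) :: P) name = if c0 == name then some r0 else pvRankP P name := by
  simp only [pvRankP, List.find?]
  by_cases h : c0 == name <;> simp [h]

theorem pvRankP_mem (P : List (Int × String)) (name : String) (r : Int)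
    (h : pvRankP P name = some r) : ∃ p ∈ P, p.1 = r ∧ p.2 = name := by
  simp only [pvRankP, Option.map_eq_some_iff] at h
  rcases h with ⟨p, hp, hfst⟩
  exact ⟨p, List.mem_of_find?_eq_some hp, hfst, by
    have := List.find?_some hp
    exact eq_of_beq this⟩

-- main generic lemma: the argmin loop over refs equals the first-hit scan of the priority list
theorem pvGLoop_main (P : List (Int × String))
    (hP : P.Pairwise (fun p q => p.1 < q.1)) (refs : List String) :
    (pvGLoop (pvRankP P) refs none).map Prod.snd = pvFirstIn (P.map Prod.snd) refs := by
  induction P with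
  | nil =>
    rw [pvGLoop_none _ _ _ (fun n _ => pvRankP_nil n)]
    rfl
  | cons p P' ih =>
    cases p with
    | mk r0 c0 =>
      have hP' : P'.Pairwise (fun p q => p.1 < q.1) := (List.pairwise_cons.mp hP).2
      have hlt : ∀ q ∈ P', r0 < q.1 := fun q hq => (List.pairwise_cons.mp hP).1 q hq
      by_cases hm : c0 ∈ refs
      · have hc : pvRankP ((r0, c0) :: P') c0 = some r0 := by
          rw [pvRankP_cons]; simp
        have hmin : ∀ n r, pvRankP ((r0, c0) :: P') n = some r → r0 ≤ r := by
          intro n r h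
          rw [pvRankP_cons] at h
          by_cases hb : c0 == n
          · simp [hb] at h; omega
          · simp [hb] at h
            rcases pvRankP_mem P' n r h with ⟨q, hq, hfst, _⟩
            exact le_of_lt (hfst ▸ hlt q hq)
        have huniq : ∀ n, pvRankP ((r0, c0) :: P') n = some r0 → n = c0 := by
          intro n h
          rw [pvRankP_cons] at h
          by_cases hb : c0 == n
          · exact (eq_of_beq hb).symm
          · simp [hb] at h
            rcases pvRankP_mem P' n r0 h with ⟨q, hq, hfst, _⟩
            exact absurd (hfst ▸ hlt q hq) (lt_irrefl r0)
        rw [pvGLoop_hit _ r0 c0 hc hmin huniq refs none hm (by intro r v h; cases h)]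
        simp [pvFirstIn, hm]
      · have hcong : ∀ n ∈ refs, pvRankP ((r0, c0) :: P') n = pvRankP P' n := by
          intro n hn
          rw [pvRankP_cons]
          have : ¬ c0 == n := by
            intro hb; exact hm ((eq_of_beq hb) ▸ hn)
          simp [this]
        rw [pvGLoop_congr _ _ refs none hcong, ih hP']
        rw [List.map_cons]
        simp only [pvFirstIn]
        rw [if_neg (by simpa [List.contains_iff_mem] using hm)]

-- pvRankB = rankP of the priority list ------------------------------------

theorem pvRankP_enumFrom (vs : List String) (k : Int) (name : String) :
    pvRankP (pvEnumFrom k vs) name = (PySem.List.index? vs name).map (fun i : Nat => k + (i : Int)) := by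
  induction vs generalizing k with
  | nil => simp [pvEnumFrom, pvRankP_nil, PySem.List.index?_eq_idxOf?]
  | cons v vs ih =>
    by_cases h : v = name
    · subst h
      rw [pvEnumFrom, pvRankP_cons, PySem.List.index?_cons_self]
      simp
    · rw [pvEnumFrom, pvRankP_cons, PySem.List.index?_cons_of_ne vs h, ih]
      have hb : ¬ (v == name) := by simpa using h
      rw [if_neg hb, Option.map_map]
      cases PySem.List.index? vs name with
      | none => rfl
      | some i =>
        simp only [Option.map_some, Function.comp_apply]
        congr 1
        omega

-- the mitochondrial tail of pvRankB equals rankP of the enumerated variants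
theorem pvRankB_mt_eq (chrom name : String) :
    (match PySem.Dict.get? pvMtVariantsB chrom with
     | some vs =>
        if vs.contains name then
          match PySem.List.index? vs name with
          | some i => some (3 + (i : Int))
          | none => none
        else none
     | none => none)
    = pvRankP (pvEnumFrom 3 (PySem.Dict.getD pvMtVariantsB chrom [])) name := by
  cases hq : PySem.Dict.get? pvMtVariantsB chrom with
  | none =>
    rw [PySem.Dict.getD_eq_get?_getD, hq]
    simp [pvEnumFrom, pvRankP_nil]
  | some vs =>
    rw [PySem.Dict.getD_eq_get?_getD, hq]
    simp only [Option.getD_some]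
    rw [pvRankP_enumFrom]
    cases hidx : PySem.List.index? vs name with
    | none =>
      have hnm : name ∉ vs := (PySem.List.index?_eq_none_iff vs name).mp hidx
      simp [hnm]
    | some i =>
      have hmem : name ∈ vs := (PySem.List.index?_isSome_iff vs name).mp (by rw [hidx]; rfl)
      simp [hmem]

theorem pvRankB_eq_rankP (chrom name : String) :
    pvRankB name chrom (String.ofList ("chr".toList ++ chrom.toList))
      (if PySem.Str.startswith chrom "chr"
       then some (PySem.Str.slice chrom (some 3) none) else none)
      (PySem.Dict.get? pvMtVariantsB chrom)
      = pvRankP (pvPof chrom) name := by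
  unfold pvRankB pvPof
  rw [pvRankP_cons, pvRankP_cons]
  by_cases h0 : name = chrom
  · simp [h0]
  · have h0' : ¬ (chrom == name) := by simpa using fun h => h0 h.symm
    have h0'' : ¬ (name == chrom) := by simpa using h0
    simp only [h0', h0'', if_false, Bool.false_eq_true]
    by_cases h1 : name = String.ofList ("chr".toList ++ chrom.toList)
    · simp [h1]
    · have h1' : ¬ (String.ofList ("chr".toList ++ chrom.toList) == name) := by
        simpa using fun h => h1 h.symm
      have h1'' : ¬ (name == String.ofList ("chr".toList ++ chrom.toList)) := by simpa using h1
      simp only [h1', h1'', if_false, Bool.false_eq_true]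
      by_cases hsw : PySem.Str.startswith chrom "chr"
      · rw [if_pos hsw, if_pos hsw, List.singleton_append, pvRankP_cons]
        by_cases h2 : name = PySem.Str.slice chrom (some 3) none
        · have h2b : (name == PySem.Str.slice chrom (some 3) none) = true := by simp [h2]
          have h2b' : (PySem.Str.slice chrom (some 3) none == name) = true := by simp [h2]
          rw [if_pos h2b', show (match some (PySem.Str.slice chrom (some 3) none) with
              | some s => name == s | none => false) = true from h2b]
          rfl
        · have h2' : ¬ (PySem.Str.slice chrom (some 3) none == name) = true := by
            simpa using fun h => h2 h.symm
          have h2'' : (match some (PySem.Str.slice chrom (some 3) none) with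
              | some s => name == s | none => false) = false := by simpa using h2
          rw [h2'', if_neg h2', if_neg (by simp)]
          exact pvRankB_mt_eq chrom name
      · rw [if_neg hsw, if_neg hsw, List.nil_append,
          show (match (none : Option String) with
            | some s => name == s | none => false) = false from rfl, if_neg (by simp)]
        exact pvRankB_mt_eq chrom name

-- the priority list: snd projection and strictly increasing ranks ----------

theorem pvEnumFrom_snd (vs : List String) (k : Int) : (pvEnumFrom k vs).map Prod.snd = vs := by
  induction vs generalizing k with
  | nil => rfl
  | cons v vs ih => simp [pvEnumFrom, ih]

theorem pvEnumFrom_fst_ge (vs : List String) (k : Int) :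
    ∀ p ∈ pvEnumFrom k vs, k ≤ p.1 := by
  induction vs generalizing k with
  | nil => intro p hp; simp [pvEnumFrom] at hp
  | cons v vs ih =>
    intro p hp
    rcases List.mem_cons.mp hp with h | h
    · subst h; simp
    · have := ih (k + 1) p h; omega

theorem pvEnumFrom_pairwise (vs : List String) (k : Int) :
    (pvEnumFrom k vs).Pairwise (fun p q => p.1 < q.1) := by
  induction vs generalizing k with
  | nil => exact List.Pairwise.nil
  | cons v vs ih =>
    rw [pvEnumFrom, List.pairwise_cons]
    exact ⟨fun q hq => by have := pvEnumFrom_fst_ge vs (k + 1) q hq; omega, ih (k + 1)⟩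

theorem pvPof_pairwise (chrom : String) :
    (pvPof chrom).Pairwise (fun p q => p.1 < q.1) := by
  unfold pvPof
  have htail : ∀ p ∈ (if PySem.Str.startswith chrom "chr" then
        [(2, PySem.Str.slice chrom (some 3) none)] else [])
      ++ pvEnumFrom 3 (PySem.Dict.getD pvMtVariantsB chrom []), (2 : Int) ≤ p.1 := by
    intro p hp
    rcases List.mem_append.mp hp with h | h
    · split at h
      · rcases List.mem_singleton.mp h with rfl; simp
      · simp at h
    · have := pvEnumFrom_fst_ge _ 3 p h; omega
  rw [List.pairwise_cons, List.pairwise_cons]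
  refine ⟨?_, ?_, ?_⟩
  · intro q hq
    rcases List.mem_cons.mp hq with rfl | h
    · simp
    · have := htail q h; simp; omega
  · intro q hq
    have := htail q hq; simp; omega
  · rw [List.pairwise_append]
    refine ⟨?_, pvEnumFrom_pairwise _ 3, ?_⟩
    · split
      · simp
      · exact List.Pairwise.nil
    · intro p hp q hq
      have hq3 := pvEnumFrom_fst_ge _ 3 q hq
      split at hp
      · rcases List.mem_singleton.mp hp with rfl; simp; omega
      · simp at hp

theorem pvPof_snd (chrom : String) :
    (pvPof chrom).map Prod.snd =
      chrom :: String.ofList ("chr".toList ++ chrom.toList) ::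
        ((if PySem.Str.startswith chrom "chr" then [PySem.Str.slice chrom (some 3) none] else [])
          ++ PySem.Dict.getD pvMtVariantsB chrom []) := by
  unfold pvPof
  simp only [List.map_cons, List.map_append, pvEnumFrom_snd, apply_ite (List.map Prod.snd),
    List.map_nil]

-- A equals the first-hit scan of the candidate list ------------------------

theorem pvFirstIn_append (xs ys rcs : List String) :
    pvFirstIn (xs ++ ys) rcs =
      match pvFirstIn xs rcs with
      | some v => some v
      | none => pvFirstIn ys rcs := by
  induction xs with
  | nil => rfl
  | cons x rest ih =>
    simp only [List.cons_append, pvFirstIn]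
    by_cases h : x ∈ rcs <;> simp [h, ih]

theorem pvGetD_eq (chrom : String) (vs : List String)
    (hq : PySem.Dict.get? pvMtVariants chrom = some vs) :
    PySem.Dict.getD pvMtVariantsB chrom [] = vs := by
  rw [PySem.Dict.getD_eq_get?_getD, show pvMtVariantsB = pvMtVariants from rfl, hq]; rfl

theorem pvGetD_eq_nil (chrom : String)
    (hq : PySem.Dict.get? pvMtVariants chrom = none) :
    PySem.Dict.getD pvMtVariantsB chrom [] = [] := by
  rw [PySem.Dict.getD_eq_get?_getD, show pvMtVariantsB = pvMtVariants from rfl, hq]; rfl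

theorem pvA_eq_firstIn (chrom : String) (rcs : List String) :
    normalize_chromosome_name chrom rcs = pvFirstIn ((pvPof chrom).map Prod.snd) rcs := by
  rw [pvPof_snd]
  unfold normalize_chromosome_name
  simp only [pvFirstIn, pvFirstIn_append]
  have hmt : (match PySem.Dict.get? pvMtVariants chrom with
      | some variants => pvAForLoop variants rcs
      | none => none) = pvFirstIn (PySem.Dict.getD pvMtVariantsB chrom []) rcs := by
    cases hq : PySem.Dict.get? pvMtVariants chrom with
    | some vs => rw [pvGetD_eq chrom vs hq, pvFirstIn_eq_pvAForLoop]
    | none => rw [pvGetD_eq_nil chrom hq]; rfl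
  by_cases h1 : chrom ∈ rcs
  · simp [h1]
  · by_cases h2 : String.ofList ('c' :: 'h' :: 'r' :: chrom.toList) ∈ rcs
    · simp [h1, h2]
    · by_cases hs : PySem.Chars.startswith chrom.toList ['c', 'h', 'r'] = true
      · by_cases h3 : PySem.Str.slice chrom (some 3) none ∈ rcs
        · simp [h1, h2, hs, h3, pvFirstIn]
        · simp [h1, h2, hs, h3, pvFirstIn, hmt]
      · simp [h1, h2, hs, pvFirstIn, hmt]

-- B equals the snd-projection of its loop ----------------------------------

theorem pvAlt_eq_map_snd (chrom : String) (rcs : List String) :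
    normalize_chromosome_name_alt chrom rcs =
      (pvLoopB chrom (String.ofList ("chr".toList ++ chrom.toList))
        (if PySem.Str.startswith chrom "chr"
         then some (PySem.Str.slice chrom (some 3) none) else none)
        (PySem.Dict.get? pvMtVariantsB chrom) rcs none).map Prod.snd := by
  have key : ∀ o : Option (Int × String),
      (match o with | some (_, v) => some v | none => none) = o.map Prod.snd := by
    intro o
    cases o with
    | none => rfl
    | some p => cases p; rfl
  exact key (pvLoopB chrom (String.ofList ("chr".toList ++ chrom.toList))
    (if PySem.Str.startswith chrom "chr"
     then some (PySem.Str.slice chrom (some 3) none) else none)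
    (PySem.Dict.get? pvMtVariantsB chrom) rcs none)

-- ===== VERDICT (by name: the statement is the Claim_ definition above) =====
theorem normalize_chromosome_name_spec : Claim_equal_normalize_chromosome_name := by
  intro chrom rcs _
  unfold Spec_normalize_chromosome_name
  rw [pvA_eq_firstIn, pvAlt_eq_map_snd, pvLoopB_eq_gLoop,
    pvGLoop_congr _ (pvRankP (pvPof chrom)) rcs none
      (fun n _ => pvRankB_eq_rankP chrom n),
    pvGLoop_main (pvPof chrom) (pvPof_pairwise chrom) rcs]
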